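-- pv_equiv track=rewrite | github.com/lingpy/pacs | develop/palex.py | get_colexifications
-- ===== SOURCE A (Python) =====
-- def get_colexifications(wordA, wordB, threshold=3):
--     if wordA == wordB:
--         return "="
--     # swap words if one is longer than the other
--     swapped = False
--     m, n = len(wordA), len(wordB)
--     if m > n:
--         swapped = True
--         wordA, wordB, m, n = wordB, wordA, n, m
--
--     # check for suffix
--     if (wordB.startswith(wordA) or wordB.endswith(wordA)) and n-m >= threshold:
--         return ">" if not swapped else "<"
--
--     # check for partial colex
--     # make threshold part of the length of the string
--     t = int(m/2+0.5)
--     if t < threshold: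
--         t = threshold
--     for i in range(m-1, t-1, -1):
--         if (
--                 wordB.startswith(wordA[:i]) or
--                 wordB.endswith(wordA[:i]) or
--                 wordB.startswith(wordA[-i:]) or
--                 wordB.endswith(wordA[-i:])
--                 ):
--             return "-"
-- ===== SOURCE B (Python) =====
-- def _common_prefix_len(a, b):
--     p = 0
--     while p < len(a) and p < len(b) and a[p] == b[p]:
--         p += 1
--     return p
--
--
-- def get_colexifications(wordA, wordB, threshold=3):
--     if wordA == wordB:
--         return "="
--     if len(wordA) <= len(wordB):
--         short, long_, swapped = wordA, wordB, False
--     else: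
--         short, long_, swapped = wordB, wordA, True
--     m, n = len(short), len(long_)
--     # overlap lengths computed once: common prefix and common suffix of the two words
--     p = _common_prefix_len(short, long_)
--     s = _common_prefix_len(short[::-1], long_[::-1])
--     if (p == m or s == m) and n - m >= threshold:
--         return "<" if swapped else ">"
--     t = max((m + 1) // 2, threshold)
--     # prefix-of-short-as-prefix-of-long / suffix-as-suffix: closed form from p and s
--     if t <= m - 1 and (p >= t or s >= t):
--         return "-"
--     # cross overlaps, longest candidate first: prefix of short as suffix of long, and vice versa
--     for i in range(m - 1, t - 1, -1):
--         if long_[n - i:] == short[:i] or long_[:i] == short[m - i:]: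
--             return "-"
--     return None
-- ===== Notes on version B (the rewrite author's own statement) =====
-- stated objective: alternative
-- what changed: B computes the common-prefix and common-suffix overlap lengths once with a single character scan each, decides the full-containment branch and two of A's four per-length affix tests by comparing those lengths to the threshold, and only scans the remaining two cross-overlap tests with direct slice equality instead of A's downward loop of four startswith/endswith calls per length.
import Mathlib
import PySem

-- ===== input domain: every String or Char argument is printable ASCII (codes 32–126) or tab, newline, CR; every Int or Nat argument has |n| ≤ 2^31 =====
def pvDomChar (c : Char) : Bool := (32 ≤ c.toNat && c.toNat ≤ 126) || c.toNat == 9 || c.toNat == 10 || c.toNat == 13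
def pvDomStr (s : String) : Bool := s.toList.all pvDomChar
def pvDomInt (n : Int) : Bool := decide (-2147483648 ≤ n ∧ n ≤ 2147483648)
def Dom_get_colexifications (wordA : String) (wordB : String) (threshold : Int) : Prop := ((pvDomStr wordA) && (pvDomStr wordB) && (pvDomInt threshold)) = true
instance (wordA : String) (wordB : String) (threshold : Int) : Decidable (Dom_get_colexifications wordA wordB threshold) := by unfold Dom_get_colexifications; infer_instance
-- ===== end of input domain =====

-- B replaces A's downward scan of all affixes by overlap lengths computed once (common prefix/suffix),
-- turning two of the four affix tests into threshold comparisons; objective: alternative decomposition.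

-- ===== PORT A =====
-- the for-loop of A: for i in range(m-1, t-1, -1): return "-" on the first hit
def pvALoop (wA wB : String) : List Int → Option String
  | [] => none
  | i :: rest =>
    if (PySem.Str.startswith wB (PySem.Str.slice wA none (some i)) ||
        PySem.Str.endswith wB (PySem.Str.slice wA none (some i)) ||
        PySem.Str.startswith wB (PySem.Str.slice wA (some (-i)) none) ||
        PySem.Str.endswith wB (PySem.Str.slice wA (some (-i)) none))
    then some "-" else pvALoop wA wB rest

def get_colexifications (wordA : String) (wordB : String) (threshold : Int) : Option String :=
  if wordA == wordB then some "=" else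
  let m := PySem.Str.len wordA
  let n := PySem.Str.len wordB
  -- the tuple swap 'wordA, wordB, m, n = wordB, wordA, n, m' under 'if m > n', componentwise
  let swapped := decide (m > n)
  let wA := if m > n then wordB else wordA
  let wB := if m > n then wordA else wordB
  let m' := if m > n then n else m
  let n' := if m > n then m else n
  if (PySem.Str.startswith wB wA || PySem.Str.endswith wB wA) && decide (n' - m' ≥ threshold) then
    some (if !swapped then ">" else "<")
  else
    -- t = int(m/2+0.5): exact port, the float arithmetic is exact for these magnitudes and equals (m+1)//2
    let t0 := PySem.Int.floordiv (m' + 1) 2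
    let t := if t0 < threshold then threshold else t0
    pvALoop wA wB (PySem.List.pyRange (m' - 1) (t - 1) (-1))

-- ===== PORT B =====
-- port of Source B's _common_prefix_len (character scan while both lists agree)
def pvCplB : List Char → List Char → Nat
  | a :: as, b :: bs => if a = b then pvCplB as bs + 1 else 0
  | _, _ => 0

-- the for-loop of B: for i in range(t, m): the two cross-overlap slice comparisons
def pvBLoop (short long : List Char) : List Int → Option String
  | [] => none
  | i :: rest =>
    if PySem.List.slice long (some ((long.length : Int) - i)) none = PySem.List.slice short none (some i) ∨
       PySem.List.slice long none (some i) = PySem.List.slice short (some ((short.length : Int) - i)) none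
    then some "-" else pvBLoop short long rest

def get_colexifications_alt (wordA : String) (wordB : String) (threshold : Int) : Option String :=
  if wordA = wordB then some "=" else
  let short := if wordA.toList.length ≤ wordB.toList.length then wordA.toList else wordB.toList
  let long  := if wordA.toList.length ≤ wordB.toList.length then wordB.toList else wordA.toList
  let swapped := !decide (wordA.toList.length ≤ wordB.toList.length)
  let m := short.length
  let n := long.length
  let p := pvCplB short long
  let s := pvCplB short.reverse long.reverse
  if (p = m ∨ s = m) ∧ (n : Int) - (m : Int) ≥ threshold then
    some (if swapped then "<" else ">")
  else
    let t : Int := max (PySem.Int.floordiv ((m : Int) + 1) 2) threshold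
    if t ≤ (m : Int) - 1 ∧ ((p : Int) ≥ t ∨ (s : Int) ≥ t) then some "-"
    else pvBLoop short long (PySem.List.pyRange ((m : Int) - 1) (t - 1) (-1))

-- ===== PRECONDITION & SPEC =====
def Spec_get_colexifications (wordA : String) (wordB : String) (threshold : Int) (out : Option String) : Prop := out = get_colexifications_alt wordA wordB threshold
instance (wordA : String) (wordB : String) (threshold : Int) (out : Option String) : Decidable (Spec_get_colexifications wordA wordB threshold out) := by unfold Spec_get_colexifications; infer_instance

-- ===== CLAIM (what is proved, stated in full; the proofs are below) =====
def Claim_equal_get_colexifications : Prop := ∀ (wordA : String) (wordB : String) (threshold : Int), Dom_get_colexifications wordA wordB threshold → Spec_get_colexifications wordA wordB threshold (get_colexifications wordA wordB threshold)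

-- ===== LEMMAS AND PROOFS =====

theorem pvCplB_le (a b : List Char) : pvCplB a b ≤ a.length := by
  induction a generalizing b with
  | nil => simp [pvCplB]
  | cons x as ih =>
    cases b with
    | nil => simp [pvCplB]
    | cons y bs =>
      by_cases h : x = y
      · simp only [pvCplB, if_pos h, List.length_cons]
        simpa using ih bs
      · simp [pvCplB, h]

theorem take_prefix_iff (a b : List Char) (k : Nat) (hk : k ≤ a.length) :
    (a.take k <+: b) ↔ k ≤ pvCplB a b := by
  induction a generalizing b k with
  | nil => simp_all
  | cons x as ih =>
    cases k with
    | zero => simp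
    | succ k =>
      cases b with
      | nil =>
        simp only [List.take_succ_cons, pvCplB]
        constructor
        · intro h; exact absurd h (by simp [List.prefix_iff_eq_take])
        · omega
      | cons y bs =>
        simp only [List.take_succ_cons, List.cons_prefix_cons, pvCplB]
        by_cases h : x = y
        · rw [if_pos h]
          simp only [h, true_and]
          rw [ih bs k (by simpa using hk)]
          omega
        · simp [h]

theorem prefix_iff_cpl (a b : List Char) : (a <+: b) ↔ pvCplB a b = a.length := by
  have h1 := take_prefix_iff a b a.length le_rfl
  rw [List.take_length] at h1
  have h2 := pvCplB_le a b
  constructor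
  · intro h; have := h1.mp h; omega
  · intro h; rw [h1]; omega

theorem suffix_iff_cpl (a b : List Char) : (a <:+ b) ↔ pvCplB a.reverse b.reverse = a.length := by
  rw [← List.reverse_prefix, prefix_iff_cpl, List.length_reverse]

-- suffix of `short` of length k, as a drop
theorem drop_suffix_iff_cpl (a b : List Char) (k : Nat) (hk : k ≤ a.length) :
    (a.drop (a.length - k) <:+ b) ↔ k ≤ pvCplB a.reverse b.reverse := by
  rw [← List.reverse_prefix, List.reverse_drop]
  have : a.length - (a.length - k) = k := by omega
  rw [this]
  exact take_prefix_iff a.reverse b.reverse k (by simpa)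

theorem pvALoop_spec (wA wB : String) (l : List Int) :
    pvALoop wA wB l =
      if ∃ i ∈ l, (PySem.List.slice wA.toList none (some i) <+: wB.toList ∨
          PySem.List.slice wA.toList none (some i) <:+ wB.toList ∨
          PySem.List.slice wA.toList (some (-i)) none <+: wB.toList ∨
          PySem.List.slice wA.toList (some (-i)) none <:+ wB.toList)
      then some "-" else none := by
  induction l with
  | nil => simp [pvALoop]
  | cons i rest ih =>
    have hg : (PySem.Str.startswith wB (PySem.Str.slice wA none (some i)) ||
        PySem.Str.endswith wB (PySem.Str.slice wA none (some i)) ||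
        PySem.Str.startswith wB (PySem.Str.slice wA (some (-i)) none) ||
        PySem.Str.endswith wB (PySem.Str.slice wA (some (-i)) none)) = true ↔
        (PySem.List.slice wA.toList none (some i) <+: wB.toList ∨
          PySem.List.slice wA.toList none (some i) <:+ wB.toList ∨
          PySem.List.slice wA.toList (some (-i)) none <+: wB.toList ∨
          PySem.List.slice wA.toList (some (-i)) none <:+ wB.toList) := by
      simp only [Bool.or_eq_true, PySem.Str.startswith_eq, PySem.Str.endswith_eq,
        PySem.Chars.startswith_iff, PySem.Chars.endswith_iff, PySem.Str.toList_slice,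
        PySem.Chars.slice_eq_listSlice]
      tauto
    by_cases h : (PySem.List.slice wA.toList none (some i) <+: wB.toList ∨
          PySem.List.slice wA.toList none (some i) <:+ wB.toList ∨
          PySem.List.slice wA.toList (some (-i)) none <+: wB.toList ∨
          PySem.List.slice wA.toList (some (-i)) none <:+ wB.toList)
    · simp only [pvALoop]
      rw [if_pos (hg.mpr h), if_pos ⟨i, by simp, h⟩]
    · simp only [pvALoop]
      rw [if_neg (fun hc => h (hg.mp hc)), ih]
      refine if_congr ?_ rfl rfl
      constructor
      · rintro ⟨j, hj, hc⟩; exact ⟨j, List.mem_cons_of_mem _ hj, hc⟩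
      · rintro ⟨j, hj, hc⟩
        rcases List.mem_cons.mp hj with rfl | hj
        · exact absurd hc h
        · exact ⟨j, hj, hc⟩

theorem pvBLoop_spec (short long : List Char) (l : List Int) :
    pvBLoop short long l =
      if ∃ i ∈ l, (PySem.List.slice long (some ((long.length : Int) - i)) none = PySem.List.slice short none (some i) ∨
       PySem.List.slice long none (some i) = PySem.List.slice short (some ((short.length : Int) - i)) none)
      then some "-" else none := by
  induction l with
  | nil => simp [pvBLoop]
  | cons i rest ih =>
    by_cases h : (PySem.List.slice long (some ((long.length : Int) - i)) none = PySem.List.slice short none (some i) ∨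
       PySem.List.slice long none (some i) = PySem.List.slice short (some ((short.length : Int) - i)) none)
    · simp only [pvBLoop]
      rw [if_pos h, if_pos ⟨i, by simp, h⟩]
    · simp only [pvBLoop]
      rw [if_neg h, ih]
      refine if_congr ?_ rfl rfl
      constructor
      · rintro ⟨j, hj, hc⟩; exact ⟨j, List.mem_cons_of_mem _ hj, hc⟩
      · rintro ⟨j, hj, hc⟩
        rcases List.mem_cons.mp hj with rfl | hj
        · exact absurd hc h
        · exact ⟨j, hj, hc⟩


-- the four take-suffix equivalences at a single index k (1 ≤ k ≤ m-1, m ≤ n)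
theorem condA_iff (short long : List Char) (hmn : short.length ≤ long.length) (k : Nat)
    (hk1 : 1 ≤ k) (hkm : k + 1 ≤ short.length) :
    (PySem.List.slice short none (some (k:Int)) <+: long ∨ PySem.List.slice short none (some (k:Int)) <:+ long ∨
     PySem.List.slice short (some (-(k:Int))) none <+: long ∨ PySem.List.slice short (some (-(k:Int))) none <:+ long)
    ↔ (k ≤ pvCplB short long ∨ k ≤ pvCplB short.reverse long.reverse ∨
       (PySem.List.slice long (some ((long.length : Int) - (k:Int))) none = PySem.List.slice short none (some (k:Int)) ∨
        PySem.List.slice long none (some (k:Int)) = PySem.List.slice short (some ((short.length : Int) - (k:Int))) none)) := by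
  rw [PySem.List.slice_to short (by positivity), PySem.List.slice_to long (by positivity),
      PySem.List.slice_from_neg_natCast short k (by omega),
      show ((long.length : Int) - (k : Int)) = ((long.length - k : Nat) : Int) by
        push_cast [Int.ofNat_sub (by omega : k ≤ long.length)]; ring,
      show ((short.length : Int) - (k : Int)) = ((short.length - k : Nat) : Int) by
        push_cast [Int.ofNat_sub (by omega : k ≤ short.length)]; ring,
      PySem.List.slice_from long (by positivity), PySem.List.slice_from short (by positivity)]
  simp only [Int.toNat_natCast]
  have h1 : (List.take k short <+: long) ↔ k ≤ pvCplB short long :=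
    take_prefix_iff short long k (by omega)
  have h2 : (List.take k short <:+ long) ↔ List.drop (long.length - k) long = List.take k short := by
    rw [List.suffix_iff_eq_drop, List.length_take]
    constructor
    · intro h; rw [show min k short.length = k by omega] at h; exact h.symm
    · intro h; rw [show min k short.length = k by omega]; exact h.symm
  have h3 : (List.drop (short.length - k) short <+: long) ↔
      List.take k long = List.drop (short.length - k) short := by
    rw [List.prefix_iff_eq_take, List.length_drop]
    rw [show short.length - (short.length - k) = k by omega]
    constructor
    · intro h; exact h.symm
    · intro h; exact h.symm
  have h4 : (List.drop (short.length - k) short <:+ long) ↔ k ≤ pvCplB short.reverse long.reverse :=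
    drop_suffix_iff_cpl short long k (by omega)
  rw [h1, h2, h3, h4]
  tauto

theorem pv_floordiv_pos (m : Nat) (hm : 1 ≤ m) : 1 ≤ PySem.Int.floordiv ((m:Int)+1) 2 := by
  rw [PySem.Int.floordiv_eq_ediv_of_pos (by norm_num)]
  omega

theorem pv_floordiv_nonneg (m : Nat) : 0 ≤ PySem.Int.floordiv ((m:Int)+1) 2 := by
  rw [PySem.Int.floordiv_eq_ediv_of_pos (by norm_num)]
  omega

-- A's downward affix scan hits iff one of the overlaps reaches the threshold window
-- or one of B's cross-overlap scans hits
theorem dash_iff (short long : List Char) (hmn : short.length ≤ long.length) (t : Int)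
    (ht : PySem.Int.floordiv ((short.length:Int)+1) 2 ≤ t) :
    (∃ i ∈ PySem.List.pyRange ((short.length:Int) - 1) (t - 1) (-1),
        (PySem.List.slice short none (some i) <+: long ∨ PySem.List.slice short none (some i) <:+ long ∨
         PySem.List.slice short (some (-i)) none <+: long ∨ PySem.List.slice short (some (-i)) none <:+ long))
    ↔ ((t ≤ (short.length:Int) - 1 ∧ ((t ≤ (pvCplB short long : Int)) ∨ t ≤ (pvCplB short.reverse long.reverse : Int))) ∨
       (∃ i ∈ PySem.List.pyRange ((short.length:Int) - 1) (t - 1) (-1),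
         (PySem.List.slice long (some ((long.length : Int) - i)) none = PySem.List.slice short none (some i) ∨
          PySem.List.slice long none (some i) = PySem.List.slice short (some ((short.length : Int) - i)) none))) := by
  have h0 : (0:Int) ≤ t := le_trans (pv_floordiv_nonneg short.length) ht
  constructor
  · rintro ⟨i, hmem, hCA⟩
    rw [PySem.List.mem_pyRange_neg_one] at hmem
    have hm1 : 1 ≤ short.length := by omega
    have ht1 : 1 ≤ t := le_trans (pv_floordiv_pos short.length hm1) ht
    obtain ⟨k, rfl⟩ : ∃ k : Nat, i = (k : Int) := ⟨i.toNat, by omega⟩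
    have hk1 : 1 ≤ k := by omega
    have hkm : k + 1 ≤ short.length := by omega
    rcases (condA_iff short long hmn k hk1 hkm).mp hCA with hp | hs | hcb
    · exact Or.inl ⟨by omega, Or.inl (by omega)⟩
    · exact Or.inl ⟨by omega, Or.inr (by omega)⟩
    · exact Or.inr ⟨(k : Int), PySem.List.mem_pyRange_neg_one.mpr ⟨by omega, by omega⟩, hcb⟩
  · rintro (⟨htm, hps⟩ | ⟨i, hmem, hCB⟩)
    · have hm1 : 1 ≤ short.length := by omega
      have ht1 : 1 ≤ t := le_trans (pv_floordiv_pos short.length hm1) ht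
      obtain ⟨k, rfl⟩ : ∃ k : Nat, t = (k : Int) := ⟨t.toNat, by omega⟩
      refine ⟨(k : Int), PySem.List.mem_pyRange_neg_one.mpr ⟨by omega, by omega⟩, ?_⟩
      refine (condA_iff short long hmn k (by omega) (by omega)).mpr ?_
      rcases hps with hp | hs
      · exact Or.inl (by omega)
      · exact Or.inr (Or.inl (by omega))
    · rw [PySem.List.mem_pyRange_neg_one] at hmem
      have hm1 : 1 ≤ short.length := by omega
      have ht1 : 1 ≤ t := le_trans (pv_floordiv_pos short.length hm1) ht
      obtain ⟨k, rfl⟩ : ∃ k : Nat, i = (k : Int) := ⟨i.toNat, by omega⟩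
      refine ⟨(k : Int), PySem.List.mem_pyRange_neg_one.mpr ⟨by omega, by omega⟩, ?_⟩
      exact (condA_iff short long hmn k (by omega) (by omega)).mpr (Or.inr (Or.inr hCB))


-- the post-swap halves of the two ports agree, for any orientation flag sw
theorem main_core (wA wB : String) (th : Int) (sw : Bool)
    (hmn : wA.toList.length ≤ wB.toList.length) :
    (if (PySem.Str.startswith wB wA || PySem.Str.endswith wB wA) && decide (PySem.Str.len wB - PySem.Str.len wA ≥ th) then
       some (if !sw then ">" else "<")
     else
       pvALoop wA wB (PySem.List.pyRange (PySem.Str.len wA - 1)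
         ((if PySem.Int.floordiv (PySem.Str.len wA + 1) 2 < th then th
           else PySem.Int.floordiv (PySem.Str.len wA + 1) 2) - 1) (-1)))
  = (if (pvCplB wA.toList wB.toList = wA.toList.length ∨ pvCplB wA.toList.reverse wB.toList.reverse = wA.toList.length) ∧ (wB.toList.length : Int) - (wA.toList.length : Int) ≥ th then
       some (if sw then "<" else ">")
     else if max (PySem.Int.floordiv ((wA.toList.length : Int) + 1) 2) th ≤ (wA.toList.length : Int) - 1 ∧ ((pvCplB wA.toList wB.toList : Int) ≥ max (PySem.Int.floordiv ((wA.toList.length : Int) + 1) 2) th ∨ (pvCplB wA.toList.reverse wB.toList.reverse : Int) ≥ max (PySem.Int.floordiv ((wA.toList.length : Int) + 1) 2) th) then some "-"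
     else pvBLoop wA.toList wB.toList (PySem.List.pyRange ((wA.toList.length : Int) - 1) (max (PySem.Int.floordiv ((wA.toList.length : Int) + 1) 2) th - 1) (-1))) := by
  have hfull : ((PySem.Str.startswith wB wA || PySem.Str.endswith wB wA) && decide (PySem.Str.len wB - PySem.Str.len wA ≥ th)) = true ↔
      ((pvCplB wA.toList wB.toList = wA.toList.length ∨ pvCplB wA.toList.reverse wB.toList.reverse = wA.toList.length) ∧ (wB.toList.length : Int) - (wA.toList.length : Int) ≥ th) := by
    rw [Bool.and_eq_true, Bool.or_eq_true, decide_eq_true_eq,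
        PySem.Str.startswith_eq, PySem.Str.endswith_eq,
        PySem.Chars.startswith_iff, PySem.Chars.endswith_iff,
        prefix_iff_cpl, suffix_iff_cpl, PySem.Str.len_eq, PySem.Str.len_eq]
  by_cases hf : (pvCplB wA.toList wB.toList = wA.toList.length ∨ pvCplB wA.toList.reverse wB.toList.reverse = wA.toList.length) ∧ (wB.toList.length : Int) - (wA.toList.length : Int) ≥ th
  · rw [if_pos (hfull.mpr hf), if_pos hf]
    cases sw <;> rfl
  · rw [if_neg (fun hc => hf (hfull.mp hc)), if_neg hf]
    have hmax : (if PySem.Int.floordiv (PySem.Str.len wA + 1) 2 < th then th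
        else PySem.Int.floordiv (PySem.Str.len wA + 1) 2)
        = max (PySem.Int.floordiv ((wA.toList.length : Int) + 1) 2) th := by
      rw [PySem.Str.len_eq]; omega
    rw [hmax, PySem.Str.len_eq, pvALoop_spec, pvBLoop_spec]
    have hiff := dash_iff wA.toList wB.toList hmn
        (max (PySem.Int.floordiv ((wA.toList.length : Int) + 1) 2) th) (le_max_left _ _)
    by_cases hP : ∃ i ∈ PySem.List.pyRange ((wA.toList.length : Int) - 1)
          (max (PySem.Int.floordiv ((wA.toList.length : Int) + 1) 2) th - 1) (-1),
        (PySem.List.slice wA.toList none (some i) <+: wB.toList ∨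
          PySem.List.slice wA.toList none (some i) <:+ wB.toList ∨
          PySem.List.slice wA.toList (some (-i)) none <+: wB.toList ∨
          PySem.List.slice wA.toList (some (-i)) none <:+ wB.toList)
    · rw [if_pos hP]
      have hXQ := hiff.mp hP
      by_cases hX : max (PySem.Int.floordiv ((wA.toList.length : Int) + 1) 2) th ≤ (wA.toList.length : Int) - 1 ∧ ((pvCplB wA.toList wB.toList : Int) ≥ max (PySem.Int.floordiv ((wA.toList.length : Int) + 1) 2) th ∨ (pvCplB wA.toList.reverse wB.toList.reverse : Int) ≥ max (PySem.Int.floordiv ((wA.toList.length : Int) + 1) 2) th)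
      · rw [if_pos hX]
      · rw [if_neg hX]
        have hX' : ¬ (max (PySem.Int.floordiv ((wA.toList.length : Int) + 1) 2) th ≤ (wA.toList.length : Int) - 1 ∧ (max (PySem.Int.floordiv ((wA.toList.length : Int) + 1) 2) th ≤ (pvCplB wA.toList wB.toList : Int) ∨ max (PySem.Int.floordiv ((wA.toList.length : Int) + 1) 2) th ≤ (pvCplB wA.toList.reverse wB.toList.reverse : Int))) := hX
        rw [if_pos (hXQ.resolve_left hX')]
    · rw [if_neg hP]
      have hnX : ¬ (max (PySem.Int.floordiv ((wA.toList.length : Int) + 1) 2) th ≤ (wA.toList.length : Int) - 1 ∧ ((pvCplB wA.toList wB.toList : Int) ≥ max (PySem.Int.floordiv ((wA.toList.length : Int) + 1) 2) th ∨ (pvCplB wA.toList.reverse wB.toList.reverse : Int) ≥ max (PySem.Int.floordiv ((wA.toList.length : Int) + 1) 2) th)) :=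
        fun hX => hP (hiff.mpr (Or.inl hX))
      have hnQ : ¬ (∃ i ∈ PySem.List.pyRange ((wA.toList.length : Int) - 1) (max (PySem.Int.floordiv ((wA.toList.length : Int) + 1) 2) th - 1) (-1),
          (PySem.List.slice wB.toList (some ((wB.toList.length : Int) - i)) none = PySem.List.slice wA.toList none (some i) ∨
           PySem.List.slice wB.toList none (some i) = PySem.List.slice wA.toList (some ((wA.toList.length : Int) - i)) none)) :=
        fun hQ => hP (hiff.mpr (Or.inr hQ))
      rw [if_neg hnX, if_neg hnQ]

-- ===== VERDICT (by name: the statement is the Claim_ definition above) =====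
theorem get_colexifications_spec : Claim_equal_get_colexifications := by
  unfold Claim_equal_get_colexifications
  intro wordA wordB th _
  unfold Spec_get_colexifications
  by_cases heq : wordA = wordB
  · simp [get_colexifications, get_colexifications_alt, heq]
  · have hbeq : ¬((wordA == wordB) = true) := by simpa using heq
    simp only [get_colexifications, get_colexifications_alt, if_neg hbeq, if_neg heq]
    by_cases hle : wordA.toList.length ≤ wordB.toList.length
    · have hgt : ¬(PySem.Str.len wordA > PySem.Str.len wordB) := by
        rw [PySem.Str.len_eq, PySem.Str.len_eq]; omega
      rw [if_neg hgt, if_neg hgt, if_neg hgt, if_neg hgt, if_pos hle, if_pos hle,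
          decide_eq_false hgt, decide_eq_true hle]
      exact main_core wordA wordB th false hle
    · have hgt : PySem.Str.len wordA > PySem.Str.len wordB := by
        rw [PySem.Str.len_eq, PySem.Str.len_eq]; omega
      rw [if_pos hgt, if_pos hgt, if_pos hgt, if_pos hgt, if_neg hle, if_neg hle,
          decide_eq_true hgt, decide_eq_false hle]
      exact main_core wordB wordA th true (by omega)
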